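-- pv_equiv track=rewrite | github.com/QasimKhan5x/TPC-DS-MySQL | scripts/load_test.py | distribute_statements
-- ===== SOURCE A (Python) =====
-- def distribute_statements(categorized_statements):
--     # Distribute the statements to threads
--     threads = [[] for _ in range(8)]
--     thread_workloads = [0] * 8
--
--     for table_name, statements in categorized_statements.items():
--         # Find the thread with the least number of statements
--         least_busy_thread_index = thread_workloads.index(min(thread_workloads))
--         # Assign the statements for this table to the least busy thread
--         threads[least_busy_thread_index].extend(statements)
--         # Update the workload count for this thread
--         thread_workloads[least_busy_thread_index] += len(statements)
--
--     return threads
-- ===== SOURCE B (Python) =====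
-- def distribute_statements(categorized_statements):
--     # Sorted pool of (workload, thread_index): pop the front (least busy,
--     # lowest index on ties) and re-insert with the updated workload, instead
--     # of rescanning the workload list for its minimum on every table.
--     threads = [[] for _ in range(8)]
--     pool = [(0, i) for i in range(8)]  # kept sorted ascending
--     for statements in categorized_statements.values():
--         workload, index = pool.pop(0)
--         threads[index].extend(statements)
--         entry = (workload + len(statements), index)
--         pos = 0
--         while pos < len(pool) and pool[pos] <= entry:
--             pos += 1
--         pool.insert(pos, entry)
--     return threads
-- ===== Notes on version B (the rewrite author's own statement) =====
-- stated objective: alternative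
-- what changed: Replaces the per-table rescan of the workload list (min + .index) with a sorted pool of (workload, thread_index) pairs that is popped at the front and re-inserted in order after each assignment; the (workload, index) ordering reproduces A's first-minimum tie-breaking.
import Mathlib
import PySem

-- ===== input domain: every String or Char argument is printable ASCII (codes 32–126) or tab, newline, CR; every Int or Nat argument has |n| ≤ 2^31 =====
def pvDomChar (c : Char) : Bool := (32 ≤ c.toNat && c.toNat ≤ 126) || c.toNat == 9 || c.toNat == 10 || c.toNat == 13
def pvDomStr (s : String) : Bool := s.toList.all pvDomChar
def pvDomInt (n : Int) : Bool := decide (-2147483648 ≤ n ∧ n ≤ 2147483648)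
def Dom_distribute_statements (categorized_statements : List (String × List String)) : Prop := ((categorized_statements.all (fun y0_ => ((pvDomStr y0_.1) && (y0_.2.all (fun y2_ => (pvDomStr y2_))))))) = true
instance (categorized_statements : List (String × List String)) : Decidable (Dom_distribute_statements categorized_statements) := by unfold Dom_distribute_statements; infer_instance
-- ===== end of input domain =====

-- B replaces A's per-table min+.index rescan of the workload list by a sorted pool of
-- (workload, thread_index) pairs popped at the front and re-inserted in order (objective: alternative).

-- ===== PORT A =====
-- loop body: idx = workloads.index(min(workloads)); threads[idx].extend(stmts); workloads[idx] += len(stmts)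
def pvStepA (st : List (List String) × List Int) (p : String × List String) :
    List (List String) × List Int :=
  match PySem.List.min? st.2 (fun x => x) with
  | none => st            -- unreachable: the workload list always has 8 entries
  | some m =>
    match PySem.List.index? st.2 m with
    | none => st          -- unreachable: m is a member
    | some i =>
      (st.1.set i (st.1.getD i [] ++ p.2), st.2.set i (st.2.getD i 0 + (p.2.length : Int)))

def distribute_statements (categorized_statements : List (String × List String)) : List (List String) :=
  (((PySem.Dict.ofList categorized_statements).items).foldl pvStepA
    ([[], [], [], [], [], [], [], []], [0, 0, 0, 0, 0, 0, 0, 0])).1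

-- ===== PORT B =====
-- Python tuple comparison (w, i) <= (w', i') on workload/index pairs
def pvPoolLE (p q : Int × Nat) : Bool := p.1 < q.1 || (p.1 == q.1 && p.2 ≤ q.2)

-- the while-loop + pool.insert(pos, entry): insert entry after every element ≤ it
def pvPoolInsert (x : Int × Nat) : List (Int × Nat) → List (Int × Nat)
  | [] => [x]
  | y :: t => if pvPoolLE y x then y :: pvPoolInsert x t else x :: y :: t

-- loop body: (w, i) = pool.pop(0); threads[i].extend(stmts); ordered re-insert of (w+len, i)
def pvStepB (st : List (List String) × List (Int × Nat)) (p : String × List String) :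
    List (List String) × List (Int × Nat) :=
  match st.2 with
  | [] => st              -- unreachable: the pool always has 8 entries
  | (w, i) :: rest =>
      (st.1.set i (st.1.getD i [] ++ p.2), pvPoolInsert (w + (p.2.length : Int), i) rest)

def distribute_statements_alt (categorized_statements : List (String × List String)) : List (List String) :=
  (((PySem.Dict.ofList categorized_statements).items).foldl pvStepB
    ([[], [], [], [], [], [], [], []],
     [(0, 0), (0, 1), (0, 2), (0, 3), (0, 4), (0, 5), (0, 6), (0, 7)])).1

-- ===== PRECONDITION & SPEC =====
def Spec_distribute_statements (categorized_statements : List (String × List String)) (out : List (List String)) : Prop := out = distribute_statements_alt categorized_statements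
instance (categorized_statements : List (String × List String)) (out : List (List String)) : Decidable (Spec_distribute_statements categorized_statements out) := by unfold Spec_distribute_statements; infer_instance

-- ===== CLAIM (what is proved, stated in full; the proofs are below) =====
def Claim_equal_distribute_statements : Prop := ∀ (categorized_statements : List (String × List String)), Dom_distribute_statements categorized_statements → Spec_distribute_statements categorized_statements (distribute_statements categorized_statements)

-- ===== LEMMAS AND PROOFS =====

theorem pvPoolLE_total (a b : Int × Nat) : pvPoolLE a b = true ∨ pvPoolLE b a = true := by
  simp only [pvPoolLE, Bool.or_eq_true, Bool.and_eq_true, decide_eq_true_eq, beq_iff_eq]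
  omega

theorem pvPoolLE_antisymm {a b : Int × Nat} (h1 : pvPoolLE a b = true) (h2 : pvPoolLE b a = true) :
    a = b := by
  simp only [pvPoolLE, Bool.or_eq_true, Bool.and_eq_true, decide_eq_true_eq, beq_iff_eq] at h1 h2
  have : a.1 = b.1 ∧ a.2 = b.2 := by omega
  exact Prod.ext this.1 this.2

theorem pvPoolInsert_perm (x : Int × Nat) (l : List (Int × Nat)) :
    (pvPoolInsert x l).Perm (x :: l) := by
  induction l with
  | nil => simp [pvPoolInsert]
  | cons y t ih =>
    simp only [pvPoolInsert]
    split
    · exact ((ih.cons y).trans (List.Perm.swap x y t))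
    · exact List.Perm.refl _

theorem pvPoolInsert_sorted {x : Int × Nat} {l : List (Int × Nat)}
    (h : l.Pairwise (fun a b => pvPoolLE a b = true)) :
    (pvPoolInsert x l).Pairwise (fun a b => pvPoolLE a b = true) := by
  induction l with
  | nil => simp [pvPoolInsert]
  | cons y t ih =>
    rcases h with _ | ⟨hy, ht⟩
    simp only [pvPoolInsert]
    split
    · rename_i hle
      refine List.Pairwise.cons ?_ (ih ht)
      intro z hz
      rcases List.mem_cons.mp ((pvPoolInsert_perm x t).mem_iff.mp hz) with rfl | hz'
      · exact hle
      · exact hy z hz'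
    · rename_i hnle
      have hxy : pvPoolLE x y = true := (pvPoolLE_total y x).resolve_left hnle
      refine List.Pairwise.cons ?_ (List.Pairwise.cons hy ht)
      intro z hz
      rcases List.mem_cons.mp hz with rfl | hz
      · exact hxy
      · -- x ≤ y ≤ z
        have hyz := hy z hz
        simp only [pvPoolLE, Bool.or_eq_true, Bool.and_eq_true, decide_eq_true_eq,
          beq_iff_eq] at hxy hyz ⊢
        omega

-- zipIdx of a point update
theorem pvZipIdx_set (l : List Int) (i : Nat) (a : Int) :
    (l.set i a).zipIdx = l.zipIdx.set i (a, i) := by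
  apply List.ext_getElem
  · simp
  · intro j h1 h2
    simp only [List.getElem_zipIdx, List.getElem_set] at *
    split <;> simp_all

-- the head of the sorted pool is (min workloads, first index of that min)
theorem pvHead_is_argmin {wl : List Int} {w0 m : Int} {i0 i : Nat} {rest : List (Int × Nat)}
    (hsort : ((w0, i0) :: rest).Pairwise (fun a b => pvPoolLE a b = true))
    (hperm : ((w0, i0) :: rest).Perm wl.zipIdx)
    (hmin : PySem.List.min? wl (fun x => x) = some m)
    (hidx : PySem.List.index? wl m = some i) :
    w0 = m ∧ i0 = i := by
  obtain ⟨hk, hki, hfirst⟩ := PySem.List.getElem_of_index?_eq_some hidx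
  have hmemmi : ((m, i) : Int × Nat) ∈ wl.zipIdx := by
    have : (wl.zipIdx)[i]'(by simpa using hk) = (wl[i], i) := by
      simp [List.getElem_zipIdx]
    rw [hki] at this
    exact this ▸ List.getElem_mem _
  have hmemmi' : ((m, i) : Int × Nat) ∈ (w0, i0) :: rest := hperm.mem_iff.mpr hmemmi
  have hmemh : ((w0, i0) : Int × Nat) ∈ wl.zipIdx := hperm.mem_iff.mp (by simp)
  obtain ⟨-, hlt, hval⟩ := List.mem_zipIdx hmemh
  simp only [Nat.zero_add, Nat.sub_zero] at hlt hval
  -- pvPoolLE (m, i) (w0, i0)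
  have h1 : pvPoolLE (m, i) (w0, i0) = true := by
    have hmle : m ≤ w0 := by
      have := PySem.List.min?_isMin hmin wl[i0] (List.getElem_mem hlt)
      omega
    rcases lt_or_eq_of_le hmle with hlt' | heq
    · simp [pvPoolLE, hlt']
    · have hii : i ≤ i0 := by
        by_contra hc
        exact hfirst i0 (by omega) (by rw [← hval, ← heq])
      simp [pvPoolLE, heq, hii]
  -- pvPoolLE (w0, i0) (m, i)
  have h2 : pvPoolLE (w0, i0) (m, i) = true := by
    rcases List.mem_cons.mp hmemmi' with h | h
    · rw [← h]
      simp [pvPoolLE]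
    · exact (List.pairwise_cons.mp hsort).1 _ h
  have h := pvPoolLE_antisymm h2 h1
  exact ⟨congrArg Prod.fst h, congrArg Prod.snd h⟩

-- the simulation invariant, preserved by one loop step
theorem pvStep_sim (threads : List (List String)) (wl : List Int) (pool : List (Int × Nat))
    (hne : wl ≠ [])
    (hsort : pool.Pairwise (fun a b => pvPoolLE a b = true))
    (hperm : pool.Perm wl.zipIdx) (p : String × List String) :
    (pvStepA (threads, wl) p).1 = (pvStepB (threads, pool) p).1 ∧
    (pvStepA (threads, wl) p).2 ≠ [] ∧
    (pvStepB (threads, pool) p).2.Pairwise (fun a b => pvPoolLE a b = true) ∧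
    (pvStepB (threads, pool) p).2.Perm (pvStepA (threads, wl) p).2.zipIdx := by
  have hne' : wl.zipIdx ≠ [] := by
    intro h
    exact hne (by simpa using congrArg List.length h)
  obtain ⟨⟨w0, i0⟩, rest, rfl⟩ : ∃ h t, pool = h :: t := by
    cases pool with
    | nil => exact absurd hperm.symm.eq_nil hne'
    | cons h t => exact ⟨h, t, rfl⟩
  obtain ⟨m, hmin⟩ : ∃ m, PySem.List.min? wl (fun x => x) = some m := by
    cases hmin : PySem.List.min? wl (fun x => x) with
    | none => exact absurd ((PySem.List.min?_eq_none_iff wl _).mp hmin) hne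
    | some m => exact ⟨m, rfl⟩
  obtain ⟨i, hidx⟩ : ∃ i, PySem.List.index? wl m = some i := by
    cases hidx : PySem.List.index? wl m with
    | none =>
      have : (PySem.List.index? wl m).isSome = true :=
        (PySem.List.index?_isSome_iff wl m).mpr (PySem.List.min?_mem hmin)
      rw [hidx] at this; cases this
    | some i => exact ⟨i, rfl⟩
  obtain ⟨rfl, rfl⟩ := pvHead_is_argmin hsort hperm hmin hidx
  obtain ⟨hk, hki, -⟩ := PySem.List.getElem_of_index?_eq_some hidx
  simp only [pvStepA, pvStepB, hmin, hidx]
  refine ⟨trivial, ?_, pvPoolInsert_sorted (List.pairwise_cons.mp hsort).2, ?_⟩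
  · intro h
    rw [List.set_eq_nil_iff] at h
    exact hne h
  · -- permutation invariant for the new pool
    have hgd : wl.getD i0 0 = w0 := List.getD_eq_getElem wl 0 hk |>.trans hki
    have hk' : i0 < wl.zipIdx.length := by simpa using hk
    have hz : (wl.set i0 (wl.getD i0 0 + (p.2.length : Int))).zipIdx
        = wl.zipIdx.set i0 (w0 + (p.2.length : Int), i0) := by
      rw [pvZipIdx_set, hgd]
    rw [hz]
    have hsplit : wl.zipIdx = wl.zipIdx.take i0 ++ (w0, i0) :: wl.zipIdx.drop (i0 + 1) := by
      conv_lhs => rw [← List.take_append_drop i0 wl.zipIdx]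
      congr 1
      rw [← List.getElem_cons_drop hk']
      congr 1
      simp [List.getElem_zipIdx, hki]
    have hrest : rest.Perm (wl.zipIdx.take i0 ++ wl.zipIdx.drop (i0 + 1)) := by
      apply List.Perm.cons_inv (a := ((w0, i0) : Int × Nat))
      calc ((w0, i0) :: rest : List (Int × Nat)).Perm wl.zipIdx := hperm
        _ = wl.zipIdx.take i0 ++ (w0, i0) :: wl.zipIdx.drop (i0 + 1) := hsplit
        _ |>.Perm ((w0, i0) :: (wl.zipIdx.take i0 ++ wl.zipIdx.drop (i0 + 1))) := List.perm_middle
    have hset : wl.zipIdx.set i0 (w0 + (p.2.length : Int), i0)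
        = wl.zipIdx.take i0 ++ (w0 + (p.2.length : Int), i0) :: wl.zipIdx.drop (i0 + 1) := by
      rw [List.set_eq_take_append_cons_drop, if_pos hk']
    rw [hset]
    exact ((pvPoolInsert_perm _ _).trans (hrest.cons _)).trans List.perm_middle.symm

theorem pvFold_sim (L : List (String × List String)) :
    ∀ (threads : List (List String)) (wl : List Int) (pool : List (Int × Nat)),
    wl ≠ [] → pool.Pairwise (fun a b => pvPoolLE a b = true) → pool.Perm wl.zipIdx →
    (L.foldl pvStepA (threads, wl)).1 = (L.foldl pvStepB (threads, pool)).1 := by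
  induction L with
  | nil => intro threads wl pool _ _ _; rfl
  | cons p t ih =>
    intro threads wl pool hne hsort hperm
    obtain ⟨h1, h2, h3, h4⟩ := pvStep_sim threads wl pool hne hsort hperm p
    simp only [List.foldl_cons]
    have hA : pvStepA (threads, wl) p = ((pvStepA (threads, wl) p).1, (pvStepA (threads, wl) p).2) := rfl
    have hB : pvStepB (threads, pool) p = ((pvStepB (threads, pool) p).1, (pvStepB (threads, pool) p).2) := rfl
    rw [hA, hB, ← h1]
    exact ih _ _ _ h2 h3 h4

-- ===== VERDICT (by name: the statement is the Claim_ definition above) =====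
theorem distribute_statements_spec : Claim_equal_distribute_statements := by
  intro cs _
  unfold Spec_distribute_statements distribute_statements distribute_statements_alt
  exact pvFold_sim _ _ _ _ (by decide) (by decide) (by decide)
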